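-- pv_equiv track=rewrite | github.com/Danwerk/Python-course | EXAM/exam4/exam.py | prettify_string
-- ===== SOURCE A (Python) =====
-- def prettify_string(input_string: str) -> str:
--     """
--     Prettify string.
--
--     - After every punctuation there should be at least one space.
--     - Every sentence should start with an uppercase letter.
--
--     Examples:
--     "Hello,I am the input of this function.please make me pretty!" => "Hello, I am the input of this function. Please
--     make me pretty!"
--     "there should be space after me-and also space after me;next sentence should be capitalized! i need to be capitalized but
--     no new space should be added." => "There should be space after me- and also space after me; next sentence should be capitalized! I need to be capitalized but
--     no new space should be added."
--     :return modified string
--     """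
--     punctuation = {'.': '. ', ',': ', ', '!': '! ', '?': '? ', ':': ': ', ';': ';', '-': '- '}
--     #  lauselõpumärk(.?!)
--     # # kirjavahemärgid(',.!?:;-')
--     # fixed_sentence = ''
--     # sentence_end = ['?', '!', '.']
--     # for s in range(len(input_string)):
--     #     inp = input_string[s]
--     #     if inp in punctuation:
--     #         fixed_sentence += punctuation[inp]
--     #     else:
--     #         fixed_sentence += inp
--     #
--
--     result = ""
--     add_space = False
--     capitalize = True
--     for c in input_string:
--         if c in '!?.':
--             capitalize = True
--         if c in "!?.,;:-":
--             add_space = True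
--         else:
--             if add_space and c != ' ':
--                 result += " "
--             add_space = False
--             if capitalize and c != ' ':
--                 c = c.upper()
--                 capitalize = False
--
--         result += c
--     return result
-- ===== SOURCE B (Python) =====
-- PUNCT = "!?.,;:-"
--
--
-- def _add_spaces(s):
--     """Pass 1: insert one space after each punctuation run followed by a non-space."""
--     cs = list(s)
--     out = []
--     for c, nxt in zip(cs, cs[1:] + [None]):
--         out.append(c)
--         if c in PUNCT and nxt is not None and nxt != ' ' and nxt not in PUNCT:
--             out.append(' ')
--     return out
--
--
-- def _capitalize(chars):
--     """Pass 2: uppercase the first non-space, non-punctuation char of each sentence."""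
--     out = []
--     cap = True
--     for c in chars:
--         if c in '.!?':
--             cap = True
--         if c != ' ' and c not in PUNCT:
--             out.append(c.upper() if cap else c)
--             cap = False
--         else:
--             out.append(c)
--     return ''.join(out)
--
--
-- def prettify_string(input_string: str) -> str:
--     return _capitalize(_add_spaces(input_string))
-- ===== Notes on version B (the rewrite author's own statement) =====
-- stated objective: alternative
-- what changed: Replaces A's single pass with three interacting flags by two independent sequential passes: first insert one space after each punctuation run followed by a non-space (lookahead on the next char), then a separate capitalization pass with a single flag.
import Mathlib
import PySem

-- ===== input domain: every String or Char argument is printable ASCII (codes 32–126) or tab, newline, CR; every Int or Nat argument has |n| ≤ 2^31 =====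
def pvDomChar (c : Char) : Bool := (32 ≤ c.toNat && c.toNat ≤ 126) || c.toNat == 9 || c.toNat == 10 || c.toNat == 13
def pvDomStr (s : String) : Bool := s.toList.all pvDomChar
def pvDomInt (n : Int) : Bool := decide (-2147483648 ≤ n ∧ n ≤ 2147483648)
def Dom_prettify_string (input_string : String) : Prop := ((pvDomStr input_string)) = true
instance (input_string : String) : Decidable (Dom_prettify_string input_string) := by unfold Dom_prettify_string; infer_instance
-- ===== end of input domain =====

-- B replaces A's one-pass three-flag loop by two sequential passes (insert spaces, then
-- capitalize); objective: alternative decomposition, no speed claim.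

-- Shared character-class helpers: `c in '!?.'` / `c in "!?.,;:-"` on a single ASCII char
-- is membership, ported as explicit comparisons (exact).
def pvInEnd (c : Char) : Bool := c == '!' || c == '?' || c == '.'
def pvInPunct (c : Char) : Bool :=
  c == '!' || c == '?' || c == '.' || c == ',' || c == ';' || c == ':' || c == '-'

-- ===== PORT A =====
-- `result += x` is modelled by a List Char accumulator, turned into a String at the end.
-- `c.upper()` on a single ASCII char is Char.toUpper (exact on the ASCII domain).
def prettifyStepA (st : List Char × Bool × Bool) (c : Char) : List Char × Bool × Bool :=
  let result := st.1
  let add_space := st.2.1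
  let capitalize := st.2.2
  let capitalize := if pvInEnd c then true else capitalize
  if pvInPunct c then
    (result ++ [c], true, capitalize)
  else
    let result := if add_space && !(c == ' ') then result ++ [' '] else result
    if capitalize && !(c == ' ') then (result ++ [c.toUpper], false, false)
    else (result ++ [c], false, capitalize)

def prettify_string (input_string : String) : String :=
  String.ofList (input_string.toList.foldl prettifyStepA ([], false, true)).1

-- ===== PORT B =====
-- Pass 1 of Source B: the zip(cs, cs[1:]+[None]) lookahead loop becomes recursion with a
-- head-of-rest lookahead (the same pairs).
def pvAddSpaces : List Char → List Char
  | [] => []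
  | c :: rest =>
    let ins : Bool :=
      match rest with
      | [] => false
      | d :: _ => pvInPunct c && !(d == ' ') && !pvInPunct d
    if ins then c :: ' ' :: pvAddSpaces rest else c :: pvAddSpaces rest

-- Pass 2 of Source B: the flag loop, carrying `cap`.
def pvCapitalize : Bool → List Char → List Char
  | _, [] => []
  | cap, c :: rest =>
    let cap := if pvInEnd c then true else cap
    if !(c == ' ') && !pvInPunct c then
      (if cap then c.toUpper else c) :: pvCapitalize false rest
    else
      c :: pvCapitalize cap rest

def prettify_string_alt (input_string : String) : String :=
  String.ofList (pvCapitalize true (pvAddSpaces input_string.toList))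

-- ===== PRECONDITION & SPEC =====
def Spec_prettify_string (input_string : String) (out : String) : Prop := out = prettify_string_alt input_string
instance (input_string : String) (out : String) : Decidable (Spec_prettify_string input_string out) := by unfold Spec_prettify_string; infer_instance

-- ===== CLAIM (what is proved, stated in full; the proofs are below) =====
def Claim_equal_prettify_string : Prop := ∀ (input_string : String), Dom_prettify_string input_string → Spec_prettify_string input_string (prettify_string input_string)

-- ===== LEMMAS AND PROOFS =====

-- The pending space A's `add_space` flag would emit in front of the list `l`.
def pvPreSp (add : Bool) : List Char → List Char
  | [] => []
  | d :: _ => if add && !(d == ' ') && !pvInPunct d then [' '] else []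

theorem pvInPunct_of_inEnd (c : Char) (h : pvInEnd c = true) : pvInPunct c = true := by
  simp only [pvInEnd, Bool.or_eq_true, beq_iff_eq] at h
  rcases h with ((h | h) | h) <;> simp [pvInPunct, h]

theorem pvInEnd_false (c : Char) (hp : pvInPunct c = false) : pvInEnd c = false := by
  by_cases h : pvInEnd c = true
  · exact absurd (pvInPunct_of_inEnd c h) (by simp [hp])
  · simpa using h

theorem pvPreSp_false (l : List Char) : pvPreSp false l = [] := by
  cases l <;> simp [pvPreSp]

theorem pvAddSpaces_punct (c : Char) (rest : List Char) (hc : pvInPunct c = true) :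
    pvAddSpaces (c :: rest) = c :: (pvPreSp true rest ++ pvAddSpaces rest) := by
  cases rest with
  | nil => simp [pvAddSpaces, pvPreSp]
  | cons d t =>
      cases h : (!(d == ' ') && !pvInPunct d) <;>
        simp [pvAddSpaces, pvPreSp, hc, h]

theorem pvAddSpaces_nonpunct (c : Char) (rest : List Char) (hc : pvInPunct c = false) :
    pvAddSpaces (c :: rest) = c :: pvAddSpaces rest := by
  cases rest <;> simp [pvAddSpaces, hc]

theorem pvCapitalize_punct (cap : Bool) (c : Char) (l : List Char) (hc : pvInPunct c = true) :
    pvCapitalize cap (c :: l) = c :: pvCapitalize (if pvInEnd c then true else cap) l := by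
  simp [pvCapitalize, hc]

theorem pvCapitalize_space (cap : Bool) (l : List Char) :
    pvCapitalize cap (' ' :: l) = ' ' :: pvCapitalize cap l := by
  simp [pvCapitalize, pvInEnd]

theorem pvCapitalize_other (cap : Bool) (c : Char) (l : List Char)
    (hp : pvInPunct c = false) (hs : ¬ c = ' ') :
    pvCapitalize cap (c :: l) = (if cap then c.toUpper else c) :: pvCapitalize false l := by
  simp [pvCapitalize, hp, hs, pvInEnd_false c hp]

theorem pvMain (cs : List Char) : ∀ (acc : List Char) (add cap : Bool),
    (cs.foldl prettifyStepA (acc, add, cap)).1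
      = acc ++ pvCapitalize cap (pvPreSp add cs ++ pvAddSpaces cs) := by
  induction cs with
  | nil => intro acc add cap; simp [pvPreSp, pvAddSpaces, pvCapitalize]
  | cons c rest ih =>
    intro acc add cap
    rw [List.foldl_cons]
    by_cases hp : pvInPunct c = true
    · have hstep : prettifyStepA (acc, add, cap) c
          = (acc ++ [c], true, if pvInEnd c then true else cap) := by
        simp [prettifyStepA, hp]
      rw [hstep, ih]
      have hpre : pvPreSp add (c :: rest) = [] := by simp [pvPreSp, hp]
      rw [hpre, List.nil_append, pvAddSpaces_punct c rest hp,
        pvCapitalize_punct cap c _ hp]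
      simp
    · rw [Bool.not_eq_true] at hp
      by_cases hsp : c = ' '
      · subst hsp
        have hstep : prettifyStepA (acc, add, cap) ' ' = (acc ++ [' '], false, cap) := by
          simp [prettifyStepA, pvInPunct, pvInEnd]
        rw [hstep, ih, pvPreSp_false, List.nil_append]
        have hpre : pvPreSp add (' ' :: rest) = [] := by simp [pvPreSp]
        rw [hpre, List.nil_append, pvAddSpaces_nonpunct ' ' rest hp,
          pvCapitalize_space]
        simp
      · have hend := pvInEnd_false c hp
        have hstep : prettifyStepA (acc, add, cap) c
            = ((if add then acc ++ [' '] else acc) ++ [if cap then c.toUpper else c],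
               false, false) := by
          cases add <;> cases cap <;> simp [prettifyStepA, hp, hend, hsp]
        rw [hstep, ih, pvPreSp_false, List.nil_append]
        have hpre : pvPreSp add (c :: rest) = if add then [' '] else [] := by
          simp [pvPreSp, hp, hsp]
        rw [hpre, pvAddSpaces_nonpunct c rest hp]
        have hco : ∀ b : Bool, pvCapitalize b (c :: pvAddSpaces rest)
            = (if b then c.toUpper else c) :: pvCapitalize false (pvAddSpaces rest) :=
          fun b => pvCapitalize_other b c _ hp hsp
        cases add <;> cases cap <;>
          simp [hco, pvCapitalize_space]

-- ===== VERDICT (by name: the statement is the Claim_ definition above) =====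
theorem prettify_string_spec : Claim_equal_prettify_string := by
  intro s _
  unfold Spec_prettify_string prettify_string prettify_string_alt
  rw [pvMain s.toList [] false true, pvPreSp_false, List.nil_append, List.nil_append]
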